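-- pv_equiv track=rewrite | github.com/tianluyuan/project_euler | euler_039.py | concatenatable_wrapper
-- ===== SOURCE A (Python) =====
-- def concatenatable(trial, num, step):
--     """returns true if pandigital number satisfies criteria for this
--     problem
--     """
--     if step*trial > num:
--         return False
--
--     numlen = len(str(num))
--     triallen = len(str(step*trial))
--     divideby = step*trial * 10**(numlen - triallen)
--     (prin, rem) = divmod(num, divideby)
--     if prin == 1 and rem == 0 and step > 1:
--         return True
--
--     if prin != 1 or str(num)[triallen:] != str(rem):
--         return False
--
--     return concatenatable(trial, rem, step+1)
--
-- def concatenatable_wrapper(num):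
--     idx = 1
--     snum = str(num)
--     trial = int(snum[0])
--     while trial < num:
--         if concatenatable(trial, num, 1):
--             return True
--         idx += 1
--         trial = int(snum[:idx])
--
--     return False
-- ===== SOURCE B (Python) =====
-- def _ndigits(n):
--     return 1 if n < 10 else 1 + _ndigits(n // 10)
--
--
-- def _check(trial, num):
--     """Purely arithmetic check: no strings, no divmod; digit counts and
--     an interval test replace A's decimal-string comparisons."""
--     n, k = num, 1
--     while True:
--         m = k * trial
--         dn, dm = _ndigits(n), _ndigits(m)
--         if dm > dn:
--             return False
--         p = m * 10 ** (dn - dm)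
--         if k > 1 and n == p:
--             return True
--         r = n - p
--         if not (0 <= r < p):
--             return False
--         if _ndigits(r) != dn - dm:
--             return False
--         n, k = r, k + 1
--
--
-- def concatenatable_wrapper(num):
--     idx = 1
--     snum = str(num)
--     trial = int(snum[0])
--     while trial < num:
--         if _check(trial, num):
--             return True
--         idx += 1
--         trial = int(snum[:idx])
--
--     return False
-- ===== Notes on version B (the rewrite author's own statement) =====
-- stated objective: alternative
-- what changed: The recursive string/divmod helper is replaced by a flat loop that works purely arithmetically: digit counts computed by repeated division plus an interval test on the remainder replace str()-slicing, divmod and decimal-string comparisons.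
import Mathlib
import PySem

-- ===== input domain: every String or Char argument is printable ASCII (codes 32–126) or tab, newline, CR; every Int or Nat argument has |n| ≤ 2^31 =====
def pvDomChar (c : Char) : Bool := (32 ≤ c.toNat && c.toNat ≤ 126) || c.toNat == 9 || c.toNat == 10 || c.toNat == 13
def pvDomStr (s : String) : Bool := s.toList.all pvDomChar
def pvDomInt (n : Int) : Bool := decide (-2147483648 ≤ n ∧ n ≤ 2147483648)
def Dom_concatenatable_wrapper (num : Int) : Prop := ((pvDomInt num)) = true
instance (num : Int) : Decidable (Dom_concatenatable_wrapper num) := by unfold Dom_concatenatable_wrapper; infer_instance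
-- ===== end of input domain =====

-- B re-implements the check purely arithmetically (digit counts + an interval test instead of
-- divmod-and-decimal-string comparisons); equal return values on every non-negative num (A raises on negative num).

-- termination facts cited by the ports' decreasing_by (they are about the ports themselves)
theorem pv_fmodAbs_lt (a b : Int) (hb : b ≠ 0) (h1 : PySem.Int.floordiv a b = 1) :
    (PySem.Int.mod a b).natAbs < a.natAbs := by
  have hdm := PySem.Int.floordiv_mul_add_mod a b
  rw [h1, one_mul] at hdm
  rcases lt_or_gt_of_ne hb with hneg | hpos
  · have := PySem.Int.mod_neg_bounds a hneg; omega
  · have h1' := PySem.Int.mod_nonneg a hpos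
    have h2 := PySem.Int.mod_lt a hpos; omega

theorem pv_fdiv10_abs_lt (n : Int) (h : ¬ n < 10) : (PySem.Int.floordiv n 10).natAbs < n.natAbs := by
  rw [PySem.Int.floordiv_eq_ediv_of_pos (by norm_num : (0:Int) < 10)]
  omega

-- ===== PORT A =====
-- helper `concatenatable(trial, num, step)`; the `none` branch of divmod? is where Python raises
-- ZeroDivisionError (a vanishing divideby) — unreachable from the wrapper on the admitted inputs.
def concatenatable_helper (trial num step : Int) : Bool :=
  if step * trial > num then false
  else
    let numlen : Nat := (PySem.Int.toChars num).length
    let triallen : Nat := (PySem.Int.toChars (step * trial)).length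
    let divideby : Int := step * trial * (10 : Int) ^ (numlen - triallen)
    match hdm : PySem.Int.divmod? num divideby with
    | none => false
    | some (prin, rem) =>
      if prin = 1 ∧ rem = 0 ∧ 1 < step then true
      else if hne : prin ≠ 1 ∨
          PySem.List.slice (PySem.Int.toChars num) (some (triallen : Int)) none ≠ PySem.Int.toChars rem then
        false
      else concatenatable_helper trial rem (step + 1)
termination_by num.natAbs
decreasing_by
  obtain ⟨h1', -⟩ := not_or.mp hne
  have h1 := not_not.mp h1'
  unfold PySem.Int.divmod? at hdm
  split at hdm
  · exact absurd hdm (by simp)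
  · rename_i hdb
    have hpr : prin = PySem.Int.floordiv num divideby ∧ rem = PySem.Int.mod num divideby := by
      constructor <;> · injection hdm with h'; injection h' <;> simp_all [PySem.Int.floordiv, PySem.Int.mod]
    obtain ⟨hp, hr⟩ := hpr
    rw [hr]
    exact pv_fmodAbs_lt num divideby hdb (by rw [← hp]; exact h1)

-- while-loop of `concatenatable_wrapper` (fuel only makes the loop total; the Python loop stops
-- after at most len(str(num)) turns; `none` for trial is int()'s ValueError — excluded by Pre_)
def pv_loopA (num : Int) (fuel idx : Nat) (trial? : Option Int) : Bool :=
  match fuel, trial? with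
  | 0, _ => false
  | _ + 1, none => false
  | fuel + 1, some trial =>
    if trial < num then
      if concatenatable_helper trial num 1 then true
      else pv_loopA num fuel (idx + 1)
        (PySem.Int.ofChars? (PySem.List.slice (PySem.Int.toChars num) none (some ((idx + 1 : Nat) : Int))))
    else false

def concatenatable_wrapper (num : Int) : Bool :=
  match PySem.List.pyGet? (PySem.Int.toChars num) 0 with
  | none => false   -- IndexError: unreachable, str(num) is never empty
  | some c => pv_loopA num ((PySem.Int.toChars num).length + 2) 1 (PySem.Int.ofChars? [c])

-- ===== PORT B =====
def pv_ndigits (n : Int) : Nat :=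
  if n < 10 then 1 else 1 + pv_ndigits (PySem.Int.floordiv n 10)
termination_by n.natAbs
decreasing_by exact pv_fdiv10_abs_lt n (by assumption)

def pv_check_loop (trial n k : Int) : Bool :=
  let m := k * trial
  let dn := pv_ndigits n
  let dm := pv_ndigits m
  if dm > dn then false
  else
    let p := m * (10 : Int) ^ (dn - dm)
    if 1 < k ∧ n = p then true
    else
      let r := n - p
      if hr : ¬ (0 ≤ r ∧ r < p) then false
      else if pv_ndigits r ≠ dn - dm then false
      else pv_check_loop trial r (k + 1)
termination_by n.natAbs
decreasing_by
  obtain ⟨hr0, hrp⟩ := not_not.mp hr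
  have key : (0:Int) ≤ n - k * trial * 10 ^ (pv_ndigits n - pv_ndigits (k * trial)) ∧
      n - k * trial * 10 ^ (pv_ndigits n - pv_ndigits (k * trial)) <
        k * trial * 10 ^ (pv_ndigits n - pv_ndigits (k * trial)) := ⟨hr0, hrp⟩
  clear hr0 hrp
  obtain ⟨h1, h2⟩ := key
  omega

def pv_check (trial num : Int) : Bool := pv_check_loop trial num 1

def pv_loopB (num : Int) (fuel idx : Nat) (trial? : Option Int) : Bool :=
  match fuel, trial? with
  | 0, _ => false
  | _ + 1, none => false
  | fuel + 1, some trial =>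
    if trial < num then
      if pv_check trial num then true
      else pv_loopB num fuel (idx + 1)
        (PySem.Int.ofChars? (PySem.List.slice (PySem.Int.toChars num) none (some ((idx + 1 : Nat) : Int))))
    else false

def concatenatable_wrapper_alt (num : Int) : Bool :=
  match PySem.List.pyGet? (PySem.Int.toChars num) 0 with
  | none => false
  | some c => pv_loopB num ((PySem.Int.toChars num).length + 2) 1 (PySem.Int.ofChars? [c])

-- ===== PRECONDITION & SPEC =====
-- Pre_ excludes exactly the negative inputs, where Python A raises ValueError (int of the minus sign).
def Pre_concatenatable_wrapper (num : Int) : Prop := 0 ≤ num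
instance (num : Int) : Decidable (Pre_concatenatable_wrapper num) := by
  unfold Pre_concatenatable_wrapper; infer_instance

def pvWitness_concatenatable_wrapper : Int := 192

def Spec_concatenatable_wrapper (num : Int) (out : Bool) : Prop := out = concatenatable_wrapper_alt num
instance (num : Int) (out : Bool) : Decidable (Spec_concatenatable_wrapper num out) := by
  unfold Spec_concatenatable_wrapper; infer_instance

-- ===== CLAIM (what is proved, stated in full; the proofs are below) =====
def Claim_equal_concatenatable_wrapper : Prop := ∀ (num : Int), Dom_concatenatable_wrapper num → Pre_concatenatable_wrapper num → Spec_concatenatable_wrapper num (concatenatable_wrapper num)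

-- ===== LEMMAS AND PROOFS =====

-- decimal-notation layer (proof-only helpers: A's port reads digit STRINGS, B's port counts digits
-- arithmetically; these definitions and lemmas bridge the two)
def pv_dig (n : Nat) : List Char :=
  if n < 10 then [Nat.digitChar n] else pv_dig (n / 10) ++ [Nat.digitChar (n % 10)]
termination_by n
decreasing_by exact Nat.div_lt_self (by omega) (by norm_num)

def pv_ndigN (n : Nat) : Nat :=
  if n < 10 then 1 else pv_ndigN (n / 10) + 1
termination_by n
decreasing_by exact Nat.div_lt_self (by omega) (by norm_num)

def pv_pad : Nat → Nat → List Char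
  | 0, _ => []
  | e + 1, b => pv_pad e (b / 10) ++ [Nat.digitChar (b % 10)]

theorem pv_toDigitsCore_eq (f : Nat) : ∀ (n : Nat) (acc : List Char), n < f →
    Nat.toDigitsCore 10 f n acc = pv_dig n ++ acc := by
  induction f with
  | zero => intro n acc h; omega
  | succ f ih =>
    intro n acc h
    rw [Nat.toDigitsCore]
    by_cases h10 : n < 10
    · have hz : n / 10 = 0 := Nat.div_eq_of_lt h10
      rw [pv_dig, if_pos h10]
      simp [hz, Nat.mod_eq_of_lt h10]
    · have hpos : 0 < n / 10 := Nat.div_pos (by omega) (by norm_num)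
      rw [if_neg (by omega), ih (n / 10) _ (by omega)]
      conv_rhs => rw [pv_dig]
      rw [if_neg h10]
      simp

theorem pv_toChars_nonneg (n : Int) (h : 0 ≤ n) : PySem.Int.toChars n = pv_dig n.toNat := by
  unfold PySem.Int.toChars
  rw [if_neg (by omega)]
  unfold Nat.toDigits
  rw [pv_toDigitsCore_eq _ _ _ (Nat.lt_succ_self _)]
  simp

theorem pv_ndigN_pos (n : Nat) : 0 < pv_ndigN n := by
  rw [pv_ndigN]; split <;> omega

theorem pv_dig_length (n : Nat) : (pv_dig n).length = pv_ndigN n := by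
  induction n using Nat.strong_induction_on with
  | _ n ih =>
    rw [pv_dig, pv_ndigN]
    by_cases h : n < 10
    · simp [h]
    · have := ih (n / 10) (Nat.div_lt_self (by omega) (by norm_num))
      simp [h, this]

theorem pv_lt_pow (n : Nat) : n < 10 ^ pv_ndigN n := by
  induction n using Nat.strong_induction_on with
  | _ n ih =>
    rw [pv_ndigN]
    by_cases h : n < 10
    · simpa [h] using h
    · have := ih (n / 10) (Nat.div_lt_self (by omega) (by norm_num))
      rw [if_neg h, pow_succ]
      omega

theorem pv_ndigN_mono {a b : Nat} (h : a ≤ b) : pv_ndigN a ≤ pv_ndigN b := by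
  induction b using Nat.strong_induction_on generalizing a with
  | _ b ih =>
    by_cases ha : a < 10
    · rw [pv_ndigN, if_pos ha]
      exact pv_ndigN_pos b
    · conv_lhs => rw [pv_ndigN]
      rw [if_neg ha]
      conv_rhs => rw [pv_ndigN]
      rw [if_neg (show ¬ b < 10 by omega)]
      have := ih (b / 10) (Nat.div_lt_self (by omega) (by norm_num)) (Nat.div_le_div_right h)
      omega

theorem pv_pad_eq_dig (e : Nat) : ∀ b : Nat, pv_ndigN b = e → pv_pad e b = pv_dig b := by
  induction e with
  | zero => intro b hb; have := pv_ndigN_pos b; omega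
  | succ e ih =>
    intro b hb
    by_cases h : b < 10
    · rw [pv_ndigN, if_pos h] at hb
      have he : e = 0 := by omega
      subst he
      show pv_pad 0 (b / 10) ++ [Nat.digitChar (b % 10)] = pv_dig b
      rw [pv_dig, if_pos h, Nat.mod_eq_of_lt h]
      rfl
    · rw [pv_ndigN, if_neg h] at hb
      show pv_pad e (b / 10) ++ [Nat.digitChar (b % 10)] = pv_dig b
      rw [ih (b / 10) (by omega)]
      conv_rhs => rw [pv_dig]
      rw [if_neg h]

theorem pv_dig_decomp (e : Nat) : ∀ a b : Nat, 1 ≤ a → b < 10 ^ e →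
    pv_dig (a * 10 ^ e + b) = pv_dig a ++ pv_pad e b := by
  induction e with
  | zero =>
    intro a b ha hb
    have hb0 : b = 0 := by omega
    subst hb0
    simp [pv_pad]
  | succ e ih =>
    intro a b ha hb
    have hpow : (10:Nat) ≤ 10 ^ (e + 1) := by
      calc (10:Nat) = 10 ^ 1 := by norm_num
      _ ≤ 10 ^ (e + 1) := Nat.pow_le_pow_right (by norm_num) (by omega)
    have h10 : ¬ (a * 10 ^ (e + 1) + b < 10) := by
      have := Nat.le_mul_of_pos_left (10 ^ (e + 1)) (show 0 < a by omega)
      omega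
    rw [pv_dig, if_neg h10]
    have hdiv : (a * 10 ^ (e + 1) + b) / 10 = a * 10 ^ e + b / 10 := by
      rw [show a * 10 ^ (e + 1) = a * 10 ^ e * 10 by ring]
      omega
    have hmod : (a * 10 ^ (e + 1) + b) % 10 = b % 10 := by
      rw [show a * 10 ^ (e + 1) = a * 10 ^ e * 10 by ring]
      omega
    have hb' : b / 10 < 10 ^ e := by
      rw [pow_succ] at hb
      omega
    rw [hdiv, hmod, ih a (b / 10) ha hb']
    show _ = pv_dig a ++ (pv_pad e (b / 10) ++ [Nat.digitChar (b % 10)])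
    rw [List.append_assoc]

theorem pv_ndigits_nonneg (n : Int) (h : 0 ≤ n) : pv_ndigits n = pv_ndigN n.toNat := by
  induction hN : n.toNat using Nat.strong_induction_on generalizing n with
  | _ N ih =>
    subst hN
    rw [pv_ndigits, pv_ndigN]
    by_cases h10 : n < 10
    · rw [if_pos h10, if_pos (by omega)]
    · have hfd : PySem.Int.floordiv n 10 = n / 10 :=
        PySem.Int.floordiv_eq_ediv_of_pos (by norm_num)
      rw [if_neg h10, if_neg (by omega), hfd]
      have htn : (n / 10).toNat = n.toNat / 10 := by omega
      have hrec := ih ((n / 10).toNat) (by omega) (n / 10) (by omega) rfl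
      rw [hrec]
      have h2 : pv_ndigN (n / 10).toNat = pv_ndigN (n.toNat / 10) := by rw [htn]
      rw [h2]
      omega

theorem pv_ndigits_lt_ten (n : Int) (h : n < 10) : pv_ndigits n = 1 := by
  rw [pv_ndigits, if_pos h]

theorem pv_drop_dig (a b e : Nat) (ha : 1 ≤ a) (hb : pv_ndigN b = e) :
    (pv_dig (a * 10 ^ e + b)).drop (pv_ndigN a) = pv_dig b := by
  rw [pv_dig_decomp e a b ha (by rw [← hb]; exact pv_lt_pow b), ← pv_dig_length a,
    List.drop_left, pv_pad_eq_dig e b hb]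

theorem pv_helper_eq : ∀ (N : Nat) (trial n step : Int), n.natAbs = N → 0 ≤ n → 1 ≤ step →
    (trial ≠ 0 ∨ 1 ≤ n) → concatenatable_helper trial n step = pv_check_loop trial n step := by
  intro N
  induction N using Nat.strong_induction_on with
  | _ N ih =>
  intro trial n step hN hn hstep htr
  have h10pos : ∀ e : Nat, (0:Int) < 10 ^ e := fun e => pow_pos (by norm_num) e
  have hdnpos := pv_ndigN_pos n.toNat
  rw [concatenatable_helper, pv_check_loop]
  dsimp only
  have hdnA : (PySem.Int.toChars n).length = pv_ndigN n.toNat := by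
    rw [pv_toChars_nonneg n hn, pv_dig_length]
  have hdnB : pv_ndigits n = pv_ndigN n.toNat := pv_ndigits_nonneg n hn
  rw [hdnA, hdnB]
  by_cases hguard : n < step * trial
  · rw [if_pos hguard]
    by_cases hdmdn : pv_ndigits (step * trial) > pv_ndigN n.toNat
    · rw [if_pos hdmdn]
    · rw [if_neg hdmdn]
      have h1pow : (1:Int) ≤ 10 ^ (pv_ndigN n.toNat - pv_ndigits (step * trial)) := by
        have := h10pos (pv_ndigN n.toNat - pv_ndigits (step * trial)); omega
      have hple : step * trial ≤ step * trial * 10 ^ (pv_ndigN n.toNat - pv_ndigits (step * trial)) :=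
        le_mul_of_one_le_right (by omega) h1pow
      rw [if_neg (by rintro ⟨-, h⟩; omega)]
      rw [dif_pos (by rintro ⟨h1, h2⟩; omega)]
  · rw [if_neg hguard]
    rcases lt_trichotomy (step * trial) 0 with hmneg | hmzero | hmpos
    · -- m < 0 : both sides are false
      have hdbneg : step * trial * 10 ^ (pv_ndigN n.toNat - (PySem.Int.toChars (step * trial)).length) < 0 :=
        mul_neg_of_neg_of_pos hmneg (h10pos _)
      split
      · exfalso
        rename_i hdm
        unfold PySem.Int.divmod? at hdm
        split at hdm
        · rename_i h0; omega
        · exact absurd hdm (by simp)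
      · rename_i prin rem hdm
        unfold PySem.Int.divmod? at hdm
        rw [if_neg (by omega)] at hdm
        simp only [Option.some.injEq, Prod.mk.injEq] at hdm
        obtain ⟨hfd', hmd'⟩ := hdm
        have hfd : PySem.Int.floordiv n (step * trial * 10 ^ (pv_ndigN n.toNat - (PySem.Int.toChars (step * trial)).length)) = prin := hfd'
        have hmd : PySem.Int.mod n (step * trial * 10 ^ (pv_ndigN n.toNat - (PySem.Int.toChars (step * trial)).length)) = rem := hmd'
        have hprinne : prin ≠ 1 := by
          intro h1
          have hsum := PySem.Int.floordiv_mul_add_mod n (step * trial * 10 ^ (pv_ndigN n.toNat - (PySem.Int.toChars (step * trial)).length))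
          have hbnd := PySem.Int.mod_neg_bounds n hdbneg
          rw [hfd, h1, one_mul] at hsum
          omega
        rw [if_neg (by rintro ⟨h, -⟩; exact hprinne h)]
        rw [dif_pos (Or.inl hprinne)]
        have hmB1 : pv_ndigits (step * trial) = 1 := pv_ndigits_lt_ten _ (by omega)
        rw [hmB1]
        rw [if_neg (by omega)]
        have hpneg : step * trial * 10 ^ (pv_ndigN n.toNat - 1) < 0 :=
          mul_neg_of_neg_of_pos hmneg (h10pos _)
        rw [if_neg (by rintro ⟨-, h⟩; omega)]
        rw [dif_pos (by rintro ⟨h1, h2⟩; omega)]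
    · -- m = 0 : trial = 0, so n ≥ 1; both sides are false
      have htr0 : trial = 0 := by
        rcases mul_eq_zero.mp hmzero with h | h
        · omega
        · exact h
      have hn1 : 1 ≤ n := by
        rcases htr with h | h
        · exact absurd htr0 h
        · exact h
      split
      · rename_i hdm
        have hmB1 : pv_ndigits (step * trial) = 1 := pv_ndigits_lt_ten _ (by omega)
        rw [hmB1]
        rw [if_neg (by omega)]
        rw [if_neg (by rintro ⟨-, h⟩; rw [hmzero, zero_mul] at h; omega)]
        rw [dif_pos (by rw [hmzero, zero_mul]; rintro ⟨h1, h2⟩; omega)]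
      · exfalso
        rename_i prin rem hdm
        unfold PySem.Int.divmod? at hdm
        rw [if_pos (by rw [hmzero, zero_mul])] at hdm
        exact absurd hdm (by simp)
    · -- m ≥ 1, m ≤ n : the real case
      have hmn : step * trial ≤ n := by omega
      have hmtn : (0:Int) ≤ step * trial := by omega
      have hmB : pv_ndigits (step * trial) = pv_ndigN (step * trial).toNat :=
        pv_ndigits_nonneg _ hmtn
      have hdmA : (PySem.Int.toChars (step * trial)).length = pv_ndigN (step * trial).toNat := by
        rw [pv_toChars_nonneg _ hmtn, pv_dig_length]
      rw [hmB, hdmA]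
      have hmono : pv_ndigN (step * trial).toNat ≤ pv_ndigN n.toNat :=
        pv_ndigN_mono (by omega)
      rw [if_neg (by omega)]
      have hdpos : (0:Int) < step * trial * 10 ^ (pv_ndigN n.toNat - pv_ndigN (step * trial).toNat) :=
        mul_pos hmpos (h10pos _)
      split
      · exfalso
        rename_i hdm
        unfold PySem.Int.divmod? at hdm
        split at hdm
        · rename_i h0; omega
        · exact absurd hdm (by simp)
      · rename_i prin rem hdm
        unfold PySem.Int.divmod? at hdm
        rw [if_neg (by omega)] at hdm
        simp only [Option.some.injEq, Prod.mk.injEq] at hdm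
        obtain ⟨hfd', hmd'⟩ := hdm
        have hfd : PySem.Int.floordiv n (step * trial * 10 ^ (pv_ndigN n.toNat - pv_ndigN (step * trial).toNat)) = prin := hfd'
        have hmd : PySem.Int.mod n (step * trial * 10 ^ (pv_ndigN n.toNat - pv_ndigN (step * trial).toNat)) = rem := hmd'
        have hsum := PySem.Int.floordiv_mul_add_mod n (step * trial * 10 ^ (pv_ndigN n.toNat - pv_ndigN (step * trial).toNat))
        have hmnn := PySem.Int.mod_nonneg n hdpos
        have hmlt := PySem.Int.mod_lt n hdpos
        rw [hfd, hmd] at hsum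
        rw [hmd] at hmnn hmlt
        have hbr : prin = 1 ↔ (step * trial * 10 ^ (pv_ndigN n.toNat - pv_ndigN (step * trial).toNat) ≤ n ∧ n < 2 * (step * trial * 10 ^ (pv_ndigN n.toNat - pv_ndigN (step * trial).toNat))) := by
          rw [← hfd, PySem.Int.floordiv_eq_iff_of_pos hdpos]
          constructor
          · rintro ⟨h1, h2⟩; omega
          · rintro ⟨h1, h2⟩; omega
        have hremeq : prin = 1 → rem = n - step * trial * 10 ^ (pv_ndigN n.toNat - pv_ndigN (step * trial).toNat) := by
          intro h1; rw [h1, one_mul] at hsum; omega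
        by_cases hacc : prin = 1 ∧ rem = 0 ∧ 1 < step
        · rw [if_pos hacc]
          obtain ⟨h1, h0, hs⟩ := hacc
          have hnd : n = step * trial * 10 ^ (pv_ndigN n.toNat - pv_ndigN (step * trial).toNat) := by
            have := hremeq h1; omega
          rw [if_pos ⟨hs, hnd⟩]
        · rw [if_neg hacc]
          have hBacc : ¬ (1 < step ∧ n = step * trial * 10 ^ (pv_ndigN n.toNat - pv_ndigN (step * trial).toNat)) := by
            rintro ⟨hs, hnd⟩
            have hp1 : prin = 1 := hbr.mpr ⟨by omega, by omega⟩
            exact hacc ⟨hp1, by have := hremeq hp1; omega, hs⟩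
          rw [if_neg hBacc]
          by_cases hprin : prin = 1
          · have hrem := hremeq hprin
            have hbb := hbr.mp hprin
            rw [dif_neg (not_not_intro ⟨by omega, by omega⟩)]
            have hrnn : (0:Int) ≤ n - step * trial * 10 ^ (pv_ndigN n.toNat - pv_ndigN (step * trial).toNat) := by omega
            have hrBnd : pv_ndigits (n - step * trial * 10 ^ (pv_ndigN n.toNat - pv_ndigN (step * trial).toNat)) = pv_ndigN (n - step * trial * 10 ^ (pv_ndigN n.toNat - pv_ndigN (step * trial).toNat)).toNat :=
          pv_ndigits_nonneg _ hrnn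
            rw [hrBnd, hrem]
            have hslice : (PySem.List.slice (PySem.Int.toChars n) (some (↑(pv_ndigN (step * trial).toNat) : Int)) none = PySem.Int.toChars (n - step * trial * 10 ^ (pv_ndigN n.toNat - pv_ndigN (step * trial).toNat))) ↔ pv_ndigN (n - step * trial * 10 ^ (pv_ndigN n.toNat - pv_ndigN (step * trial).toNat)).toNat = pv_ndigN n.toNat - pv_ndigN (step * trial).toNat := by
              rw [pv_toChars_nonneg n hn, pv_toChars_nonneg _ hrnn, PySem.List.slice_from_natCast]
              constructor
              · intro heq
                have hlen := congrArg List.length heq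
                rw [List.length_drop, pv_dig_length, pv_dig_length] at hlen
                omega
              · intro h
                have hdecomp : n.toNat = (step * trial).toNat * 10 ^ (pv_ndigN n.toNat - pv_ndigN (step * trial).toNat) + (n - step * trial * 10 ^ (pv_ndigN n.toNat - pv_ndigN (step * trial).toNat)).toNat := by
                  have hcast : (n.toNat : Int) = ((step * trial).toNat : Int) * ((10:Int) ^ (pv_ndigN n.toNat - pv_ndigN (step * trial).toNat)) + (((n - step * trial * 10 ^ (pv_ndigN n.toNat - pv_ndigN (step * trial).toNat)).toNat : Int)) := by
                    rw [Int.toNat_of_nonneg hn, Int.toNat_of_nonneg hmtn, Int.toNat_of_nonneg hrnn]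
                    ring
                  exact_mod_cast hcast
                conv_lhs => rw [hdecomp]
                exact pv_drop_dig _ _ _ (by omega) h
            by_cases hnd : pv_ndigN (n - step * trial * 10 ^ (pv_ndigN n.toNat - pv_ndigN (step * trial).toNat)).toNat = pv_ndigN n.toNat - pv_ndigN (step * trial).toNat
            · rw [dif_neg (by rw [not_or, not_not, not_not]; exact ⟨hprin, hslice.mpr hnd⟩)]
              rw [if_neg (not_not_intro hnd)]
              exact ih ((n - step * trial * 10 ^ (pv_ndigN n.toNat - pv_ndigN (step * trial).toNat)).natAbs)
                (by omega) trial _ (step + 1) rfl (by omega) (by omega)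
                (Or.inl (by intro h0; rw [h0, mul_zero] at hmpos; omega))
            · rw [dif_pos (Or.inr (fun hsl => hnd (hslice.mp hsl)))]
              rw [if_pos hnd]
          · rw [dif_pos (Or.inl hprin)]
            rw [dif_pos (by rintro ⟨h1, h2⟩; exact hprin (hbr.mpr ⟨by omega, by omega⟩))]

theorem pv_loop_eq (num : Int) (h : 0 ≤ num) : ∀ (fuel idx : Nat) (t? : Option Int),
    pv_loopA num fuel idx t? = pv_loopB num fuel idx t? := by
  intro fuel
  induction fuel with
  | zero => intro idx t?; rfl
  | succ fuel ih =>
    intro idx t?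
    cases t? with
    | none => rfl
    | some trial =>
      show (if trial < num then _ else false) = (if trial < num then _ else false)
      by_cases hlt : trial < num
      · rw [if_pos hlt, if_pos hlt]
        have hside : trial ≠ 0 ∨ 1 ≤ num := by
          rcases (by omega : num = 0 ∨ 1 ≤ num) with h0 | h1
          · left; omega
          · right; exact h1
        rw [pv_helper_eq num.natAbs trial num 1 rfl h (by norm_num) hside]
        show (if pv_check_loop trial num 1 then true else _) = (if pv_check trial num then true else _)
        unfold pv_check
        by_cases hc : pv_check_loop trial num 1 = true
        · rw [if_pos hc, if_pos hc]
        · rw [if_neg hc, if_neg hc, ih]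
      · rw [if_neg hlt, if_neg hlt]

-- ===== VERDICT (by name: the statement is the Claim_ definition above) =====
theorem concatenatable_wrapper_spec : Claim_equal_concatenatable_wrapper := by
  intro num _ hpre
  unfold Spec_concatenatable_wrapper concatenatable_wrapper concatenatable_wrapper_alt
  cases PySem.List.pyGet? (PySem.Int.toChars num) 0 with
  | none => rfl
  | some c => exact pv_loop_eq num hpre _ _ _
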